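-- pv_equiv track=rewrite | github.com/alexiatwerkgroup/alexia-twerk-web-clean | scripts/generate-sitemaps.py | changefreq_for
-- ===== SOURCE A (Python) =====
-- DETAIL_FOLDERS = {
--     'playlist', 'cosplay-fancam-leaks', 'korean-girls-kpop-twerk',
--     'twerk-hub-leaks', 'latina-model-leaks', 'try-on-hot-leaks',
-- }
--
-- def changefreq_for(rel_path):
--     if rel_path == 'index.html':
--         return 'daily'
--     if rel_path.startswith('blog/'):
--         return 'monthly'
--     if any(rel_path.startswith(d + '/') for d in DETAIL_FOLDERS):
--         return 'weekly'
--     if rel_path.startswith('ko/') or rel_path.startswith('ja/'):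
--         return 'weekly'
--     return 'monthly'
-- ===== SOURCE B (Python) =====
-- WEEKLY = {
--     'playlist', 'cosplay-fancam-leaks', 'korean-girls-kpop-twerk',
--     'twerk-hub-leaks', 'latina-model-leaks', 'try-on-hot-leaks',
--     'ko', 'ja',
-- }
--
-- def changefreq_for(rel_path):
--     if rel_path == 'index.html':
--         return 'daily'
--     i = rel_path.find('/')
--     if i != -1 and rel_path[:i] in WEEKLY:
--         return 'weekly'
--     return 'monthly'
-- ===== Notes on version B (the rewrite author's own statement) =====
-- stated objective: simpler
-- what changed: Replaces the cascade of startswith guards and the any() prefix scan (and the redundant blog/ branch) by computing the first path segment once (find '/' plus one slice) and testing it against a single unified WEEKLY set.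
import Mathlib
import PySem

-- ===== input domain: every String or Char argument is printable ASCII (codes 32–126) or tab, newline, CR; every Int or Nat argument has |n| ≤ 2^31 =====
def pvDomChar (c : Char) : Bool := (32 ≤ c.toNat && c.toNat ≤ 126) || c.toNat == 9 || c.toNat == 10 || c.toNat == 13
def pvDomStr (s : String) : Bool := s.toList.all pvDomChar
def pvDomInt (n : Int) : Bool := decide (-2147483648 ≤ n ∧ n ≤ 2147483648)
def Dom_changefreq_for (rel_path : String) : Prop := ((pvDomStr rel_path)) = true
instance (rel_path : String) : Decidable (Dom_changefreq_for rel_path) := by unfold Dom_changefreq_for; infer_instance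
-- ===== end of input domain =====

-- B computes the first path segment once (find '/' + slice) and tests one unified WEEKLY set,
-- replacing A's cascade of startswith guards and any() prefix scan; objective: simpler.

-- ===== PORT A =====
def pvDetailFolders : PySem.Set String := PySem.Set.ofList
  ["playlist", "cosplay-fancam-leaks", "korean-girls-kpop-twerk",
   "twerk-hub-leaks", "latina-model-leaks", "try-on-hot-leaks"]

def changefreq_for (rel_path : String) : String :=
  if rel_path == "index.html" then "daily"
  else if PySem.Str.startswith rel_path "blog/" then "monthly"
  else if pvDetailFolders.any (fun d => PySem.Str.startswith rel_path (d ++ "/")) then "weekly"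
  else if PySem.Str.startswith rel_path "ko/" || PySem.Str.startswith rel_path "ja/" then "weekly"
  else "monthly"

-- ===== PORT B =====
def pvWeekly : PySem.Set String := PySem.Set.ofList
  ["playlist", "cosplay-fancam-leaks", "korean-girls-kpop-twerk",
   "twerk-hub-leaks", "latina-model-leaks", "try-on-hot-leaks", "ko", "ja"]

def changefreq_for_alt (rel_path : String) : String :=
  if rel_path == "index.html" then "daily"
  else
    let i := PySem.Str.find rel_path "/"
    if i != -1 && PySem.Set.contains pvWeekly (PySem.Str.slice rel_path none (some i)) then "weekly"
    else "monthly"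

-- ===== PRECONDITION & SPEC =====
def Spec_changefreq_for (rel_path : String) (out : String) : Prop := out = changefreq_for_alt rel_path
instance (rel_path : String) (out : String) : Decidable (Spec_changefreq_for rel_path out) := by unfold Spec_changefreq_for; infer_instance

-- ===== CLAIM (what is proved, stated in full; the proofs are below) =====
def Claim_equal_changefreq_for : Prop := ∀ (rel_path : String), Dom_changefreq_for rel_path → Spec_changefreq_for rel_path (changefreq_for rel_path)

-- ===== LEMMAS AND PROOFS =====

-- find.go on the single-char needle '/' : index of first '/', counted from k.
theorem pv_find_go_slash (cs : List Char) (k : Nat) :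
    PySem.Chars.find.go ['/'] cs k =
      if '/' ∈ cs then ((k + (cs.takeWhile (· ≠ '/')).length : Nat) : Int) else -1 := by
  induction cs generalizing k with
  | nil => simp [PySem.Chars.find.go]
  | cons c t ih =>
    by_cases hc : c = '/'
    · subst hc; simp [PySem.Chars.find.go, List.isPrefixOf, List.takeWhile]
    · have hc' : ¬('/' = c) := fun h => hc h.symm
      by_cases hm : '/' ∈ t
      · simp [PySem.Chars.find.go, List.isPrefixOf, hc, hc', hm, List.takeWhile, ih (k+1)]
        push_cast
        ring
      · simp [PySem.Chars.find.go, List.isPrefixOf, hc, hc', hm, List.takeWhile, ih (k+1)]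

theorem pv_find_slash (cs : List Char) :
    PySem.Chars.find cs ['/'] =
      if '/' ∈ cs then (((cs.takeWhile (· ≠ '/')).length : Nat) : Int) else -1 := by
  simpa using pv_find_go_slash cs 0

-- startswith (p ++ "/") decides "there is a '/' and the first segment is p", for p without '/'.
theorem pv_startswith_slash (cs p : List Char) (hp : '/' ∉ p) :
    (p ++ ['/']).isPrefixOf cs = (decide ('/' ∈ cs) && (cs.takeWhile (· ≠ '/') == p)) := by
  induction cs generalizing p with
  | nil => simp
  | cons c t ih =>
    cases p with
    | nil =>
      by_cases hc : c = '/'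
      · subst hc; simp [List.isPrefixOf, List.takeWhile]
      · have hc' : ¬('/' = c) := fun h => hc h.symm
        simp [List.isPrefixOf, hc, hc', List.takeWhile]
    | cons q p' =>
      have hq : q ≠ '/' := fun h => hp (h ▸ List.mem_cons_self ..)
      have hp' : '/' ∉ p' := fun h => hp (List.mem_cons_of_mem _ h)
      by_cases hcq : c = q
      · subst hcq
        have hc : c ≠ '/' := hq
        have hc' : ¬('/' = c) := fun h => hc h.symm
        simp [List.isPrefixOf, List.takeWhile, hc, hc', ih p' hp']
      · by_cases hc : c = '/'
        · subst hc; simp [List.isPrefixOf, List.takeWhile, Ne.symm hcq]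
        · have hq' : ¬(q = c) := fun h => hcq h.symm
          have hc' : ¬('/' = c) := fun h => hc h.symm
          have h1 : (q == c) = false := by simp [hq']
          have h2 : (c == q) = false := by simp [hcq]
          simp [List.isPrefixOf, List.takeWhile, hc, hc', h1, h2, hcq]

-- take (takeWhile p l).length l = takeWhile p l
theorem pv_take_takeWhile (p : Char → Bool) (l : List Char) :
    l.take (l.takeWhile p).length = l.takeWhile p := by
  induction l with
  | nil => simp
  | cons c t ih =>
    by_cases h : p c <;> simp [List.takeWhile, h, ih]

-- Str-level wrapper of pv_startswith_slash.
theorem pv_sw (s d : String) (hp : '/' ∉ d.toList) :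
    PySem.Str.startswith s (d ++ "/") =
      (decide ('/' ∈ s.toList) && (s.toList.takeWhile (· ≠ '/') == d.toList)) := by
  rw [PySem.Str.startswith_eq]
  have h : (d ++ "/").toList = d.toList ++ ['/'] := by simp
  rw [h]
  exact pv_startswith_slash _ _ hp

theorem pv_ofList_eq (t : List Char) (w : String) : (String.ofList t = w) ↔ t = w.toList := by
  constructor
  · intro h; simpa using congrArg String.toList h
  · intro h; subst h; simp

theorem pv_if_or (b c : Bool) (x y : String) :
    (if b then x else if c then x else y) = if b || c then x else y := by
  cases b <;> simp

-- ===== VERDICT (by name: the statement is the Claim_ definition above) =====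
theorem changefreq_for_spec : Claim_equal_changefreq_for := by
  intro s _
  unfold Spec_changefreq_for changefreq_for changefreq_for_alt
  by_cases hidx : s = "index.html"
  · simp [hidx]
  · have hne : (s == "index.html") = false := by simp [hidx]
    have hb : PySem.Str.startswith s "blog/" =
        (decide ('/' ∈ s.toList) && (s.toList.takeWhile (· ≠ '/') == "blog".toList)) :=
      pv_sw s "blog" (by decide)
    have hko : PySem.Str.startswith s "ko/" =
        (decide ('/' ∈ s.toList) && (s.toList.takeWhile (· ≠ '/') == "ko".toList)) :=
      pv_sw s "ko" (by decide)
    have hja : PySem.Str.startswith s "ja/" =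
        (decide ('/' ∈ s.toList) && (s.toList.takeWhile (· ≠ '/') == "ja".toList)) :=
      pv_sw s "ja" (by decide)
    have hf : PySem.Str.find s "/" = PySem.Chars.find s.toList ['/'] := by
      simp [PySem.Str.find]
    have hDF : pvDetailFolders =
        ["playlist", "cosplay-fancam-leaks", "korean-girls-kpop-twerk",
         "twerk-hub-leaks", "latina-model-leaks", "try-on-hot-leaks"] := rfl
    have hW : pvWeekly =
        ["playlist", "cosplay-fancam-leaks", "korean-girls-kpop-twerk",
         "twerk-hub-leaks", "latina-model-leaks", "try-on-hot-leaks", "ko", "ja"] := rfl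
    simp only [hne, Bool.false_eq_true, if_false, hDF, hW, List.any_cons, List.any_nil,
      hb, hko, hja, hf, pv_find_slash,
      pv_sw s "playlist" (by decide), pv_sw s "cosplay-fancam-leaks" (by decide),
      pv_sw s "korean-girls-kpop-twerk" (by decide), pv_sw s "twerk-hub-leaks" (by decide),
      pv_sw s "latina-model-leaks" (by decide), pv_sw s "try-on-hot-leaks" (by decide)]
    by_cases hm : '/' ∈ s.toList
    · rw [if_pos hm]
      set t := s.toList.takeWhile (· ≠ '/') with ht
      have hlen : (((t.length : Nat) : Int) != -1) = true := by
        simp [bne]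
      have hslice : PySem.Str.slice s none (some ((t.length : Nat) : Int)) = String.ofList t := by
        simp [PySem.Str.slice, PySem.List.slice_to_natCast, PySem.Chars.slice, ht, pv_take_takeWhile]
      simp only [hm, decide_true, Bool.true_and, hlen, hslice]
      by_cases hblog : t = "blog".toList
      · simp only [hblog]
        decide
      · have hblog' : ¬t = ['b','l','o','g'] := by simpa using hblog
        have hb2 : (t == "blog".toList) = false := by simp [hblog']
        simp only [hb2, Bool.false_eq_true, if_false, pv_if_or]
        simp [PySem.Set.contains, pv_ofList_eq, Bool.or_assoc]
    · simp [hm]
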